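-- pv_equiv track=rewrite | github.com/oliviaradcliffe/cagey-puzzle | cagey_csp.py | eq_divide
-- ===== SOURCE A (Python) =====
-- import itertools
--
-- def eq_divide(vals, eq):
--     '''checks if the values given (vals) can be divided in any
--     order to equal the var eq'''
--     # go through the possible permutations of the values
--     for values in itertools.permutations(vals):
--
--         # set the first value to be the numerator
--         quo = values[0]
--
--         # divide the rest of the values
--         for i in range(1, len(values)):
--             quo //= values[i]
--
--         # check if its equal to the given eq
--         if(quo == eq):
--             return True
--
--     return False
-- ===== SOURCE B (Python) =====
-- def eq_divide(vals, eq):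
--     '''checks if the values given (vals) can be divided in any
--     order to equal the var eq'''
--     # Backtracking over distinct choices: pick a numerator, then repeatedly pick
--     # a distinct remaining divisor; prune when the quotient reaches 0 (it stays 0).
--     def search(q, rest):
--         if not rest:
--             return q == eq
--         if q == 0:
--             return eq == 0
--         for d in dict.fromkeys(rest):
--             r2 = list(rest)
--             r2.remove(d)
--             if search(q // d, r2):
--                 return True
--         return False
--     for n in dict.fromkeys(vals):
--         r2 = list(vals)
--         r2.remove(n)
--         if search(n, r2):
--             return True
--     return False
-- ===== Notes on version B (the rewrite author's own statement) =====
-- stated objective: alternative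
-- what changed: Replaces enumeration of all n! permutations by recursive backtracking that at each level tries only the DISTINCT remaining divisors (dict.fromkeys), short-circuits on the first success, and prunes whole subtrees once the quotient reaches 0 (it then stays 0).
import Mathlib
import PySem

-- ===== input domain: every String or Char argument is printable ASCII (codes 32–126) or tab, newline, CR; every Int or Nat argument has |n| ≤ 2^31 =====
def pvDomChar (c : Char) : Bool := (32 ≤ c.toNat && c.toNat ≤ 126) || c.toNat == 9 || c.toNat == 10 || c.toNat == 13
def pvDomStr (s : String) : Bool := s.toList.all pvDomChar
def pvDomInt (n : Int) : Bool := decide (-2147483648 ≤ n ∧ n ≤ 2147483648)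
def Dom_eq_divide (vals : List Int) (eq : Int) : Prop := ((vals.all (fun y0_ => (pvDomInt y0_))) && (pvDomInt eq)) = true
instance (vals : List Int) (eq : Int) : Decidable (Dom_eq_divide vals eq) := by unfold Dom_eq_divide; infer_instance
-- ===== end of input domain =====

-- B replaces A's enumeration of all permutations by distinct-choice backtracking
-- with early exit and a quotient-0 prune (objective: alternative / pruned search).
-- ===== PORT A =====
-- chain of left-to-right floor divisions: values[0] // values[1] // …
-- (the [] case is unreachable under Pre_: Python raises IndexError on values[0])
def pvChain : List Int → Int
  | [] => 0
  | v :: rest => rest.foldl (fun q d => PySem.Int.floordiv q d) v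

def eq_divide (vals : List Int) (eq : Int) : Bool :=
  vals.permutations.any (fun values => pvChain values == eq)

-- ===== PORT B =====
-- erasing a member shortens the list (used by pvSearch's termination proof)
theorem pvEraseLen {a : Int} {l : List Int} (h : a ∈ l) : (l.erase a).length < l.length := by
  have h1 := List.length_erase_of_mem h
  have h2 : l.length ≠ 0 := by intro h0; simp [List.length_eq_zero_iff.mp h0] at h
  omega

theorem pvMemDedup {a : Int} {l : List Int} : a ∈ PySem.List.dedup l ↔ a ∈ l := by
  rw [PySem.List.dedup_eq_ofList, PySem.Set.mem_ofList]

-- Source B's search: if rest empty, compare; if q == 0, only 0 is reachable;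
-- else try each distinct remaining divisor (dict.fromkeys = PySem.List.dedup)
def pvSearch (eqv : Int) (q : Int) (rest : List Int) : Bool :=
  if rest = [] then q == eqv
  else if q == 0 then eqv == 0
  else (PySem.List.dedup rest).attach.any
    (fun d => pvSearch eqv (PySem.Int.floordiv q d.1) (rest.erase d.1))
termination_by rest.length
decreasing_by exact pvEraseLen (pvMemDedup.mp d.2)

def eq_divide_alt (vals : List Int) (eq : Int) : Bool :=
  (PySem.List.dedup vals).any (fun n => pvSearch eq n (vals.erase n))

-- ===== PRECONDITION & SPEC =====
-- Pre_ excludes exactly the inputs on which A raises: the empty list (IndexError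
-- on values[0]) and the zero-containing lists of length ≥ 2 on which A hits a
-- zero divisor before any matching permutation (A returns, True, only when the
-- list starts with its unique 0 and eq = 0; those inputs stay inside Pre_).
def Pre_eq_divide (vals : List Int) (eq : Int) : Prop :=
  vals ≠ [] ∧ (2 ≤ vals.length → (0 : Int) ∈ vals →
    (vals.count 0 = 1 ∧ vals.head? = some 0 ∧ eq = 0))
instance (vals : List Int) (eq : Int) : Decidable (Pre_eq_divide vals eq) := by
  unfold Pre_eq_divide; infer_instance

def pvWitness_eq_divide : List Int × Int := ([7, 2], 3)

def Spec_eq_divide (vals : List Int) (eq : Int) (out : Bool) : Prop := out = eq_divide_alt vals eq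
instance (vals : List Int) (eq : Int) (out : Bool) : Decidable (Spec_eq_divide vals eq out) := by unfold Spec_eq_divide; infer_instance

-- ===== CLAIM (what is proved, stated in full; the proofs are below) =====
def Claim_equal_eq_divide : Prop := ∀ (vals : List Int) (eq : Int), Dom_eq_divide vals eq → Pre_eq_divide vals eq → Spec_eq_divide vals eq (eq_divide vals eq)

-- ===== LEMMAS AND PROOFS =====

-- floor division of 0 by anything is 0, so a chain started at 0 stays 0
theorem pvFd_zero (d : Int) : PySem.Int.floordiv 0 d = 0 := by
  simp [PySem.Int.floordiv]

theorem pvFoldl_zero (p : List Int) :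
    p.foldl (fun q d => PySem.Int.floordiv q d) 0 = 0 := by
  induction p with
  | nil => rfl
  | cons d t ih => simpa [pvFd_zero] using ih

-- characterisation of B's search: true iff some ordering of rest divides q down to eqv
theorem pvSearch_iff (eqv q : Int) (rest : List Int) :
    pvSearch eqv q rest = true ↔
      ∃ p : List Int, p.Perm rest ∧
        p.foldl (fun a d => PySem.Int.floordiv a d) q = eqv := by
  induction hn : rest.length using Nat.strong_induction_on generalizing rest q with
  | _ n ih =>
    subst hn
    match rest with
    | [] =>
      rw [pvSearch, if_pos rfl]
      constructor
      · intro h; exact ⟨[], List.Perm.refl _, by simpa using (beq_iff_eq.mp h)⟩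
      · rintro ⟨p, hp, hf⟩
        have : p = [] := List.Perm.eq_nil hp
        subst this; simpa using beq_iff_eq.mpr hf
    | a :: rs =>
      rw [pvSearch, if_neg (List.cons_ne_nil a rs)]
      by_cases hq : q = 0
      · subst hq
        simp only [beq_self_eq_true, if_true]
        constructor
        · intro h
          have he : eqv = 0 := by simpa using h
          refine ⟨a :: rs, List.Perm.refl _, ?_⟩
          simp [he, List.foldl_cons, pvFd_zero, pvFoldl_zero]
        · rintro ⟨p, hp, hf⟩
          have hpz : p.foldl (fun a d => PySem.Int.floordiv a d) 0 = 0 := pvFoldl_zero p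
          rw [hpz] at hf
          simpa using beq_iff_eq.mpr hf.symm
      · rw [if_neg (by simpa using hq)]
        simp only [List.any_eq_true, List.mem_attach, true_and, Subtype.exists]
        constructor
        · rintro ⟨d, hd, hsearch⟩
          have hdm : d ∈ a :: rs := pvMemDedup.mp hd
          have hlen : ((a :: rs).erase d).length < (a :: rs).length := pvEraseLen hdm
          obtain ⟨p', hp', hf'⟩ := (ih _ hlen _ _ rfl).mp hsearch
          refine ⟨d :: p', ?_, by simpa using hf'⟩
          exact (hp'.cons d).trans (List.perm_cons_erase hdm).symm
        · rintro ⟨p, hp, hf⟩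
          match p with
          | [] => exact absurd (List.Perm.eq_nil hp.symm) (by simp)
          | d :: t =>
            have hdm : d ∈ a :: rs := hp.subset (by simp)
            have hpe : (d :: t).Perm (d :: (a :: rs).erase d) :=
              hp.trans (List.perm_cons_erase hdm)
            have ht : t.Perm ((a :: rs).erase d) := hpe.cons_inv
            have hlen : ((a :: rs).erase d).length < (a :: rs).length := pvEraseLen hdm
            refine ⟨d, pvMemDedup.mpr hdm, ?_⟩
            exact (ih _ hlen _ _ rfl).mpr ⟨t, ht, by simpa using hf⟩

-- characterisation of B overall
theorem pvAlt_iff (vals : List Int) (eqv : Int) :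
    eq_divide_alt vals eqv = true ↔
      ∃ p : List Int, p.Perm vals ∧ p ≠ [] ∧ pvChain p = eqv := by
  unfold eq_divide_alt
  simp only [List.any_eq_true]
  constructor
  · rintro ⟨n, hn, hs⟩
    have hnm : n ∈ vals := pvMemDedup.mp hn
    obtain ⟨p', hp', hf'⟩ := (pvSearch_iff eqv n (vals.erase n)).mp hs
    exact ⟨n :: p', ((hp'.cons n).trans (List.perm_cons_erase hnm).symm), by simp,
      by simpa [pvChain] using hf'⟩
  · rintro ⟨p, hp, hne, hc⟩
    match p with
    | [] => exact absurd rfl hne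
    | n :: t =>
      have hnm : n ∈ vals := hp.subset (by simp)
      have ht : t.Perm (vals.erase n) :=
        (hp.trans (List.perm_cons_erase hnm)).cons_inv
      exact ⟨n, pvMemDedup.mpr hnm,
        (pvSearch_iff eqv n (vals.erase n)).mpr ⟨t, ht, by simpa [pvChain] using hc⟩⟩

-- characterisation of A
theorem pvA_iff (vals : List Int) (eqv : Int) :
    eq_divide vals eqv = true ↔
      ∃ p : List Int, p.Perm vals ∧ pvChain p = eqv := by
  unfold eq_divide
  simp only [List.any_eq_true, List.mem_permutations, beq_iff_eq]

-- ===== VERDICT (by name: the statement is the Claim_ definition above) =====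
theorem eq_divide_spec : Claim_equal_eq_divide := by
  intro vals eqv _ hpre
  unfold Spec_eq_divide
  have hiff : eq_divide vals eqv = true ↔ eq_divide_alt vals eqv = true := by
    rw [pvA_iff, pvAlt_iff]
    constructor
    · rintro ⟨p, hp, hc⟩
      refine ⟨p, hp, ?_, hc⟩
      intro hnil; subst hnil
      exact hpre.1 hp.symm.eq_nil
    · rintro ⟨p, hp, _, hc⟩; exact ⟨p, hp, hc⟩
  cases ha : eq_divide vals eqv <;> cases hb : eq_divide_alt vals eqv <;> simp_all
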